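-- pv_equiv track=rewrite | github.com/azevedotau-ai/LeetCode-Easy | MajorityFrequencyCharacters.py | majorityFrequencyCharacters
-- ===== SOURCE A (Python) =====
-- from collections import Counter, defaultdict
--
-- def majorityFrequencyCharacters(s: str) -> str:
--     fr = Counter(s)
--     fr2 = defaultdict(list)
--
--     for c, count in fr.items():
--         fr2[count].append(c)
--
--     best= -1
--     ans = ""
--
--     for k in sorted(fr2.keys(), key=lambda x: -x):
--
--         if len(fr2[k]) > best:
--             best = len(fr2[k])
--             ans = "".join(fr2[k])
--     return ans
-- ===== SOURCE B (Python) =====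
-- from collections import Counter
--
-- def majorityFrequencyCharacters(s: str) -> str:
--     if not s:
--         return ""
--     fr = Counter(s)
--     counts = Counter(fr.values())
--     best_freq = max(counts, key=lambda f: (counts[f], f))
--     return "".join(c for c in fr if fr[c] == best_freq)
-- ===== Notes on version B (the rewrite author's own statement) =====
-- stated objective: simpler
-- what changed: Replaces A's frequency->character-list grouping dict, descending sort of the frequencies and manual best/ans scan by a count-of-counts Counter, a single keyed max over it, and one filter of the character Counter's keys.
import Mathlib
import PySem

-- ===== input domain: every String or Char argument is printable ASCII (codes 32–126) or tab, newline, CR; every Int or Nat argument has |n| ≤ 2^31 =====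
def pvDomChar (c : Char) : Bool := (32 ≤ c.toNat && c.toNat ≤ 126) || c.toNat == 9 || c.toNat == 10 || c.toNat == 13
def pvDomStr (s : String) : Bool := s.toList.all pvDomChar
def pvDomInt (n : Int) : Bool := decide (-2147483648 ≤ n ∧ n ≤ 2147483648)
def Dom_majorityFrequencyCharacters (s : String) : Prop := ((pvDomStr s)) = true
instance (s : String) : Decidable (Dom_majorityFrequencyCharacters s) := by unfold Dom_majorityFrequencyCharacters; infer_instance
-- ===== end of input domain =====

-- B replaces A's group-lists dict, descending sort and best/ans scan by a count-of-counts
-- Counter, a single keyed max, and one filter over the character Counter (simpler, no sort).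

-- ===== PORT A =====
-- Strings are carried as List Char (PySem convention); the running `ans` string is the
-- list of characters and `"".join(fr2[k])` / the final return is String.ofList.
def majorityFrequencyCharacters (s : String) : String :=
  let fr : PySem.Dict Char Int := PySem.Dict.counter s.toList
  let fr2 : PySem.Dict Int (List Char) :=
    fr.items.foldl (fun d p => d.modify p.2 [] (fun l => l ++ [p.1])) PySem.Dict.empty
  let r :=
    (PySem.List.sorted fr2.keys (fun x => -x) false).foldl
      (fun (st : Int × List Char) k =>
        if ((fr2.getD k []).length : Int) > st.1
        then (((fr2.getD k []).length : Int), fr2.getD k [])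
        else st)
      (-1, [])
  String.ofList r.2

-- ===== PORT B =====
def majorityFrequencyCharacters_alt (s : String) : String :=
  if s.toList = [] then "" else
  let fr : PySem.Dict Char Int := PySem.Dict.counter s.toList
  let counts : PySem.Dict Int Int := PySem.Dict.counter fr.values
  match PySem.List.max2? counts.keys (fun f => counts.getD f 0) (fun f => f) with
  | none => ""   -- unreachable: counts is nonempty because s is
  | some best => String.ofList (fr.keys.filter (fun c => fr.getD c 0 == best))

-- ===== PRECONDITION & SPEC =====
def Spec_majorityFrequencyCharacters (s : String) (out : String) : Prop := out = majorityFrequencyCharacters_alt s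
instance (s : String) (out : String) : Decidable (Spec_majorityFrequencyCharacters s out) := by unfold Spec_majorityFrequencyCharacters; infer_instance

-- ===== CLAIM (what is proved, stated in full; the proofs are below) =====
def Claim_equal_majorityFrequencyCharacters : Prop := ∀ (s : String), Dom_majorityFrequencyCharacters s → Spec_majorityFrequencyCharacters s (majorityFrequencyCharacters s)

-- ===== LEMMAS AND PROOFS =====

-- lexicographic ≤ on (key, element) pairs, the order both selection loops maximise
def pvLexLE (a b : Int × Int) : Prop := a.1 < b.1 ∨ (a.1 = b.1 ∧ a.2 ≤ b.2)

theorem pvLexLE_refl (a : Int × Int) : pvLexLE a a := by unfold pvLexLE; omega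

theorem pvLexLE_trans {a b c : Int × Int} (h1 : pvLexLE a b) (h2 : pvLexLE b c) : pvLexLE a c := by
  unfold pvLexLE at *; omega

theorem pvLexLE_antisymm_snd {a b x y : Int} (h1 : pvLexLE (a, x) (b, y)) (h2 : pvLexLE (b, y) (a, x)) :
    x = y := by
  unfold pvLexLE at *; omega

-- B's max(counts, key=lambda f: (counts[f], f)) loop: the accumulator is a lexicographic maximum
theorem pvScanB (k1 : Int → Int) (l : List Int) : ∀ (m0 : Int), ∃ m',
    List.foldl (fun acc x => match acc with
      | none => some x
      | some m => if (decide (k1 m < k1 x) || (!decide (k1 x < k1 m) && decide (m < x))) = true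
                  then some x else some m)
      (some m0) l = some m'
    ∧ (m' = m0 ∨ m' ∈ l)
    ∧ pvLexLE (k1 m0, m0) (k1 m', m')
    ∧ ∀ x ∈ l, pvLexLE (k1 x, x) (k1 m', m') := by
  induction l with
  | nil => exact fun m0 => ⟨m0, rfl, Or.inl rfl, pvLexLE_refl _, by simp⟩
  | cons y t ih =>
    intro m0
    by_cases hc : k1 m0 < k1 y ∨ k1 m0 ≤ k1 y ∧ m0 < y
    · obtain ⟨m', hfold, hmem, hle, hall⟩ := ih y
      refine ⟨m', ?_, ?_, ?_, ?_⟩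
      · simp only [List.foldl_cons]
        simpa [hc] using hfold
      · rcases hmem with h | h
        · exact Or.inr (by simp [h])
        · exact Or.inr (by simp [h])
      · refine pvLexLE_trans ?_ hle
        unfold pvLexLE; omega
      · intro x hx
        rcases List.mem_cons.mp hx with h | h
        · subst h; exact hle
        · exact hall x h
    · obtain ⟨m', hfold, hmem, hle, hall⟩ := ih m0
      refine ⟨m', ?_, ?_, hle, ?_⟩
      · simp only [List.foldl_cons]
        simpa [hc] using hfold
      · rcases hmem with h | h
        · exact Or.inl h
        · exact Or.inr (by simp [h])
      · intro x hx
        rcases List.mem_cons.mp hx with h | h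
        · subst h
          refine pvLexLE_trans ?_ hle
          unfold pvLexLE
          omega
        · exact hall x h

-- A's best/ans scan over the strictly descending frequency list keeps a lexicographic maximum
theorem pvScanA (g : Int → List Char) (l : List Int) : ∀ (m : Int), l.Pairwise (· > ·) →
    (∀ k ∈ l, k < m) →
    ∃ m', (m' = m ∨ m' ∈ l)
    ∧ (∀ x, (x = m ∨ x ∈ l) → pvLexLE (((g x).length : Int), x) (((g m').length : Int), m'))
    ∧ l.foldl (fun (st : Int × List Char) k =>
        if ((g k).length : Int) > st.1 then (((g k).length : Int), g k) else st)
        (((g m).length : Int), g m)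
      = (((g m').length : Int), g m') := by
  induction l with
  | nil =>
    intro m _ _
    exact ⟨m, Or.inl rfl, by rintro x (rfl | h); exacts [pvLexLE_refl _, by simp at h], rfl⟩
  | cons y t ih =>
    intro m hpw hlt
    have hyt : ∀ k ∈ t, k < y := by
      intro k hk; exact (List.pairwise_cons.mp hpw).1 k hk
    have hpt : t.Pairwise (· > ·) := (List.pairwise_cons.mp hpw).2
    by_cases hc : ((g y).length : Int) > ((g m).length : Int)
    · obtain ⟨m', hmem, hall, hfold⟩ := ih y hpt hyt
      refine ⟨m', ?_, ?_, ?_⟩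
      · rcases hmem with h | h
        · exact Or.inr (by simp [h])
        · exact Or.inr (by simp [h])
      · intro x hx
        rcases hx with h | h
        · subst h
          refine pvLexLE_trans ?_ (hall y (Or.inl rfl))
          unfold pvLexLE; omega
        · rcases List.mem_cons.mp h with h | h
          · subst h; exact hall x (Or.inl rfl)
          · exact hall x (Or.inr h)
      · simpa [hc] using hfold
    · obtain ⟨m', hmem, hall, hfold⟩ := ih m hpt (fun k hk => lt_trans (hyt k hk) (hlt y (by simp)))
      refine ⟨m', ?_, ?_, ?_⟩
      · rcases hmem with h | h
        · exact Or.inl h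
        · exact Or.inr (by simp [h])
      · intro x hx
        rcases hx with h | h
        · exact hall x (Or.inl h)
        · rcases List.mem_cons.mp h with h | h
          · subst h
            refine pvLexLE_trans ?_ (hall m (Or.inl rfl))
            unfold pvLexLE
            have := hlt x (by simp); omega
          · exact hall x (Or.inr h)
      · simpa [hc] using hfold

-- Abbreviations for the two programs' intermediate data (proof-side only)
def pvFr (cs : List Char) : PySem.Dict Char Int := PySem.Dict.counter cs

def pvFr2 (cs : List Char) : PySem.Dict Int (List Char) :=
  (pvFr cs).items.foldl (fun d p => d.modify p.2 [] (fun l => l ++ [p.1])) PySem.Dict.empty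

def pvG (cs : List Char) (k : Int) : List Char := (pvFr2 cs).getD k []

def pvCounts (cs : List Char) : PySem.Dict Int Int := PySem.Dict.counter (pvFr cs).values

-- the frequency-k group is the characters whose count is k, in fr.items order
theorem pvG_eq (cs : List Char) (k : Int) :
    pvG cs k = ((pvFr cs).items.filter (fun p => p.2 == k)).map (fun p => p.1) := by
  unfold pvG pvFr2
  have hstep : (pvFr cs).items.foldl (fun d p => d.modify p.2 [] (fun l => l ++ [p.1]))
        PySem.Dict.empty
      = ((pvFr cs).items.map (fun p => (p.2, p.1))).foldl
          (fun d q => d.modify q.1 [] (fun l => l ++ [q.2])) PySem.Dict.empty := by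
    rw [List.foldl_map]
  rw [hstep, PySem.Dict.getD_foldl_modify_append]
  simp [List.filter_map, Function.comp_def, List.map_map]

-- count-of-counts agrees with the group length
theorem pvCounts_getD (cs : List Char) (k : Int) :
    (pvCounts cs).getD k 0 = ((pvG cs k).length : Int) := by
  unfold pvCounts
  rw [PySem.Dict.getD_counter, pvG_eq]
  simp [PySem.Dict.values, List.count_eq_countP, List.countP_eq_length_filter, List.filter_map,
    Function.comp_def]

-- both programs range over the same list of frequencies
theorem pvKeys_eq (cs : List Char) : (pvFr2 cs).keys = (pvCounts cs).keys := by
  unfold pvFr2 pvCounts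
  have h1 : ((pvFr cs).items.foldl (fun d p => d.modify p.2 [] (fun l => l ++ [p.1]))
        PySem.Dict.empty).keys
      = PySem.Set.update (PySem.Dict.empty : PySem.Dict Int (List Char)).keys
          ((pvFr cs).items.map (fun p => p.2)) :=
    PySem.Dict.keys_foldl_modify_key (pvFr cs).items (fun p => p.2) [] (fun _ p l => l ++ [p.1])
      PySem.Dict.empty
  rw [h1, PySem.Dict.keys_empty, PySem.Set.update_nil_left, PySem.Dict.keys_counter]
  rfl

theorem pvItems_ne (cs : List Char) (h : cs ≠ []) : (pvFr cs).items ≠ [] := by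
  intro h0
  have hk : (pvFr cs).keys = [] := by simp [PySem.Dict.keys, h0]
  rw [show (pvFr cs).keys = PySem.Set.ofList cs from PySem.Dict.keys_counter cs] at hk
  obtain ⟨c, cs', rfl⟩ := List.exists_cons_of_ne_nil h
  have : c ∈ PySem.Set.ofList (c :: cs') := (PySem.Set.mem_ofList _ _).mpr (by simp)
  rw [hk] at this
  simp at this

theorem pvCountsKeys_ne (cs : List Char) (h : cs ≠ []) : (pvCounts cs).keys ≠ [] := by
  unfold pvCounts
  rw [PySem.Dict.keys_counter]
  obtain ⟨p, l, hl⟩ := List.exists_cons_of_ne_nil (pvItems_ne cs h)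
  have hv : (pvFr cs).values = p.2 :: l.map (fun q => q.2) := by
    simp [PySem.Dict.values, hl]
  rw [hv, PySem.Set.ofList_cons]
  simp

-- the selected group, written as B writes it: a filter of the character counter's keys
theorem pvFilter_eq (cs : List Char) (m : Int) :
    pvG cs m = (pvFr cs).keys.filter (fun c => (pvFr cs).getD c 0 == m) := by
  rw [pvG_eq, show (pvFr cs).keys = (pvFr cs).items.map (fun p => p.1) from rfl, List.filter_map]
  congr 1
  apply List.filter_congr
  intro p hp
  have := PySem.Dict.getD_of_mem_items (pvFr cs) (k := p.1) (v := p.2) (by simpa using hp)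
    (PySem.Dict.nodup_keys_counter cs) 0
  simp [Function.comp, this]

-- the two selection loops agree (A over the descending sort, B over the keys as they come)
theorem pvMain (cs : List Char) (h : cs ≠ []) :
    String.ofList ((PySem.List.sorted (pvFr2 cs).keys (fun x => -x) false).foldl
      (fun (st : Int × List Char) k =>
        if ((pvG cs k).length : Int) > st.1 then (((pvG cs k).length : Int), pvG cs k) else st)
      (-1, [])).2
    = match PySem.List.max2? (pvCounts cs).keys (fun f => (pvCounts cs).getD f 0) (fun f => f) with
      | none => ""
      | some best => String.ofList ((pvFr cs).keys.filter (fun c => (pvFr cs).getD c 0 == best)) := by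
  have hKnodup : (pvCounts cs).keys.Nodup := PySem.Dict.nodup_keys_counter _
  have hKne : (pvCounts cs).keys ≠ [] := pvCountsKeys_ne cs h
  -- A side: the sorted frequency list is strictly descending
  have hks2 : PySem.List.sorted (pvFr2 cs).keys (fun x => -x) false
      = PySem.List.sorted (pvCounts cs).keys (fun x => -x) false := by rw [pvKeys_eq]
  have hperm : (PySem.List.sorted (pvFr2 cs).keys (fun x => -x) false).Perm (pvCounts cs).keys := by
    rw [hks2]; exact PySem.List.sorted_perm _ _ _
  have hpw0 : (PySem.List.sorted (pvFr2 cs).keys (fun x => -x) false).Pairwise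
      (fun a b => -a ≤ -b) := by rw [hks2]; exact PySem.List.sorted_pairwise _ _
  have hnd : (PySem.List.sorted (pvFr2 cs).keys (fun x => -x) false).Nodup :=
    hperm.nodup_iff.mpr hKnodup
  have hpw : (PySem.List.sorted (pvFr2 cs).keys (fun x => -x) false).Pairwise (· > ·) := by
    refine (hpw0.and hnd).imp ?_
    rintro a b ⟨h1, h2⟩
    omega
  have hksne : PySem.List.sorted (pvFr2 cs).keys (fun x => -x) false ≠ [] := by
    rw [hks2]
    simpa [PySem.List.sorted_eq_nil_iff] using hKne
  obtain ⟨k0, t, hkst⟩ := List.exists_cons_of_ne_nil hksne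
  rw [hkst] at hperm hpw
  obtain ⟨mA, hmemA, hallA, hfoldA⟩ := pvScanA (pvG cs) t k0 (List.pairwise_cons.mp hpw).2
    (fun k hk => (List.pairwise_cons.mp hpw).1 k hk)
  -- B side
  obtain ⟨c0, u, hKu⟩ := List.exists_cons_of_ne_nil hKne
  obtain ⟨mB, hfoldB, hmemB, hleB, hallB⟩ := pvScanB (fun f => (pvCounts cs).getD f 0) u c0
  have hmax : PySem.List.max2? (pvCounts cs).keys
      (fun f => (pvCounts cs).getD f 0) (fun f => f) = some mB := by
    unfold PySem.List.max2?
    rw [hKu, List.foldl_cons]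
    convert hfoldB using 2
    funext acc x
    cases acc <;> rfl
  -- the two chosen frequencies coincide
  have hallA' : ∀ x ∈ (pvCounts cs).keys,
      pvLexLE (((pvG cs x).length : Int), x) (((pvG cs mA).length : Int), mA) := by
    intro x hx
    have : x ∈ k0 :: t := hperm.mem_iff.mpr hx
    exact hallA x (by simpa using List.mem_cons.mp this)
  have hallB' : ∀ x ∈ (pvCounts cs).keys,
      pvLexLE (((pvG cs x).length : Int), x) (((pvG cs mB).length : Int), mB) := by
    intro x hx
    rw [hKu] at hx
    have h1 : pvLexLE ((pvCounts cs).getD x 0, x) ((pvCounts cs).getD mB 0, mB) := by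
      rcases List.mem_cons.mp hx with rfl | hx
      · exact hleB
      · exact hallB x hx
    simpa [pvCounts_getD] using h1
  have hmA_K : mA ∈ (pvCounts cs).keys := by
    refine hperm.mem_iff.mp ?_
    rcases hmemA with h1 | h1
    · simp [h1]
    · simp [h1]
  have hmB_K : mB ∈ (pvCounts cs).keys := by
    rw [hKu]
    rcases hmemB with h1 | h1
    · simp [h1]
    · simp [h1]
  have hAB : mA = mB :=
    pvLexLE_antisymm_snd (hallB' mA hmA_K) (hallA' mB hmB_K)
  rw [hkst, List.foldl_cons]
  have hpos : ((-1 : Int), ([] : List Char)).1 < ((pvG cs k0).length : Int) := by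
    show (-1 : Int) < _
    omega
  rw [if_pos hpos, hfoldA, hmax]
  show String.ofList (pvG cs mA)
    = String.ofList (List.filter (fun c => (pvFr cs).getD c 0 == mB) (pvFr cs).keys)
  rw [hAB, ← pvFilter_eq]

-- ===== VERDICT (by name: the statement is the Claim_ definition above) =====
theorem majorityFrequencyCharacters_spec : Claim_equal_majorityFrequencyCharacters := by
  intro s _
  unfold Spec_majorityFrequencyCharacters
  by_cases hs : s.toList = []
  · simp only [majorityFrequencyCharacters, majorityFrequencyCharacters_alt, hs]
    rfl
  · simpa only [majorityFrequencyCharacters, majorityFrequencyCharacters_alt, if_neg hs,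
      pvG, pvFr2, pvFr, pvCounts] using pvMain s.toList hs
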